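-- pv_equiv track=rewrite | github.com/ShiYiXu11/Master_Thesis_Project | Data/KG/KG_from_Wikidata.py | find_preferred
-- ===== SOURCE A (Python) =====
-- def find_preferred(claims):
--     normal_claims = []
--     for claim in claims:
--         if claim["rank"] == "preferred":
--             return [claim]
--         if claim["rank"] == "normal":
--             normal_claims.append(claim)
--     return normal_claims
-- ===== SOURCE B (Python) =====
-- def find_preferred(claims):
--     claims = list(claims)
--     preferred = next((c for c in claims if c["rank"] == "preferred"), None)
--     if preferred is not None:
--         return [preferred]
--     return [c for c in claims if c["rank"] == "normal"]
-- ===== Notes on version B (the rewrite author's own statement) =====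
-- stated objective: idiomatic
-- what changed: Replaced the fused accumulate-with-early-exit loop by two passes: a short-circuiting search for the first preferred claim, else a filter comprehension over the normal claims.
import Mathlib
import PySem

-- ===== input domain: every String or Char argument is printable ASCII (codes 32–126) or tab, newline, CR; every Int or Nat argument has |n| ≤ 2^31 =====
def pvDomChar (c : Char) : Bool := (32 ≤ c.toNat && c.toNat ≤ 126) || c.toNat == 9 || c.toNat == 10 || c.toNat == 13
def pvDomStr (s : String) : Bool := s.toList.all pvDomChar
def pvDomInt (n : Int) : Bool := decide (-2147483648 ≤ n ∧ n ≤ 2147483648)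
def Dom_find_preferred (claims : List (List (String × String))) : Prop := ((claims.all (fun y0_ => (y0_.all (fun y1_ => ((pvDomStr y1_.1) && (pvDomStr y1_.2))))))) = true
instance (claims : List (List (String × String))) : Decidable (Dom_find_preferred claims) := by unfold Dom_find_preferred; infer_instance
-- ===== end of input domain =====

-- B replaces A's fused accumulate-with-early-exit loop by two passes (find the first
-- preferred claim, else filter the normals); equivalence of return values is proved.

-- dict lookup claim["rank"]: first match in the association list (none = KeyError)
def pvRank (claim : List (String × String)) : Option String :=
  List.lookup "rank" claim

-- ===== PORT A =====
def find_preferred_go (claims : List (List (String × String)))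
    (normal_claims : List (List (String × String))) : List (List (String × String)) :=
  match claims with
  | [] => normal_claims
  | claim :: rest =>
    match pvRank claim with
    | none => []  -- KeyError in Python; excluded by Pre_find_preferred
    | some r =>
      if r = "preferred" then [claim]
      else if r = "normal" then find_preferred_go rest (normal_claims ++ [claim])
      else find_preferred_go rest normal_claims

def find_preferred (claims : List (List (String × String))) : List (List (String × String)) :=
  find_preferred_go claims []

-- ===== PORT B =====
def find_preferred_alt (claims : List (List (String × String))) : List (List (String × String)) :=
  match claims.find? (fun c => pvRank c == some "preferred") with
  | some c => [c]
  | none => claims.filter (fun c => pvRank c == some "normal")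

-- ===== PRECONDITION & SPEC =====
-- Pre_ excludes exactly the inputs where Python A raises KeyError: a claim without a
-- "rank" key occurring before any preferred-ranked claim (B raises KeyError there too).
def Pre_find_preferred (claims : List (List (String × String))) : Prop :=
  ∀ c ∈ claims.takeWhile (fun c => ¬ (pvRank c == some "preferred")), pvRank c ≠ none
instance (claims : List (List (String × String))) : Decidable (Pre_find_preferred claims) := by
  unfold Pre_find_preferred; infer_instance
def pvWitness_find_preferred : (List (List (String × String))) :=
  [[("rank", "normal"), ("v", "1")], [("rank", "preferred")]]
def Spec_find_preferred (claims : List (List (String × String))) (out : List (List (String × String))) : Prop := out = find_preferred_alt claims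
instance (claims : List (List (String × String))) (out : List (List (String × String))) : Decidable (Spec_find_preferred claims out) := by unfold Spec_find_preferred; infer_instance

-- ===== CLAIM (what is proved, stated in full; the proofs are below) =====
def Claim_equal_find_preferred : Prop := ∀ (claims : List (List (String × String))), Dom_find_preferred claims → Pre_find_preferred claims → Spec_find_preferred claims (find_preferred claims)

-- ===== LEMMAS AND PROOFS =====

-- loop invariant: A's loop with accumulator acc equals B's two-pass result with acc prepended
theorem find_preferred_go_eq (claims : List (List (String × String)))
    (acc : List (List (String × String)))
    (hpre : ∀ c ∈ claims.takeWhile (fun c => ¬ (pvRank c == some "preferred")), pvRank c ≠ none) :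
    find_preferred_go claims acc =
      match claims.find? (fun c => pvRank c == some "preferred") with
      | some c => [c]
      | none => acc ++ claims.filter (fun c => pvRank c == some "normal") := by
  induction claims generalizing acc with
  | nil => simp [find_preferred_go]
  | cons claim rest ih =>
    by_cases hp : pvRank claim == some "preferred"
    · obtain ⟨r, hr⟩ : ∃ r, pvRank claim = some r := by
        cases h : pvRank claim with
        | none => simp [h] at hp
        | some r => exact ⟨r, rfl⟩
      have hrp : r = "preferred" := by simpa [hr] using hp
      simp [find_preferred_go, hr, hrp]
    · have hp' : pvRank claim ≠ some "preferred" := by simpa using hp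
      have hmem : claim ∈ (claim :: rest).takeWhile (fun c => ¬ (pvRank c == some "preferred")) := by
        simp [hp']
      have hne := hpre claim hmem
      obtain ⟨r, hr⟩ : ∃ r, pvRank claim = some r := by
        cases h : pvRank claim with
        | none => exact absurd h hne
        | some r => exact ⟨r, rfl⟩
      have hrp : r ≠ "preferred" := by
        intro h; apply hp; simp [hr, h]
      have hrest : ∀ c ∈ rest.takeWhile (fun c => ¬ (pvRank c == some "preferred")), pvRank c ≠ none := by
        intro c hc
        apply hpre
        rw [List.takeWhile_cons_of_pos (by simpa using hp)]
        exact List.mem_cons_of_mem _ hc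
      by_cases hn : r = "normal"
      · have := ih (acc ++ [claim]) hrest
        simp [find_preferred_go, hr, hn, this]
      · have := ih acc hrest
        simp [find_preferred_go, hr, hrp, hn, this]

-- ===== VERDICT (by name: the statement is the Claim_ definition above) =====
theorem find_preferred_spec : Claim_equal_find_preferred := by
  intro claims _ hpre
  unfold Spec_find_preferred find_preferred find_preferred_alt
  exact find_preferred_go_eq claims [] hpre
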